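-- pv_equiv track=rewrite | github.com/TechRoot/Glass | 20210412/lib/boolean_logic.py | _combine_pairs
-- ===== SOURCE A (Python) =====
-- from typing import Iterable, List, Set, Tuple, Dict, Optional, Callable
--
-- def _combine_pairs(a: str, b: str) -> Optional[str]:
--     """Combina dos términos binarios si difieren en un solo bit.
--
--     Devuelve la cadena combinada con un guion ('-') en la posición que difiere,
--     o None si no se pueden combinar.
--     """
--     diff = 0
--     combined = []
--     for ca, cb in zip(a, b):
--         if ca != cb:
--             diff += 1
--             combined.append('-')
--         else:
--             combined.append(ca)
--         if diff > 1:
--             return None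
--     return ''.join(combined) if diff == 1 else None
-- ===== SOURCE B (Python) =====
-- def _combine_pairs(a: str, b: str):
--     diffs = [i for i, (ca, cb) in enumerate(zip(a, b)) if ca != cb]
--     if len(diffs) != 1:
--         return None
--     i = diffs[0]
--     m = min(len(a), len(b))
--     return a[:i] + '-' + a[i + 1:m]
-- ===== Notes on version B (the rewrite author's own statement) =====
-- stated objective: alternative
-- what changed: Replaces the fused count-and-build loop (with early return) by a single pass collecting the differing indices, followed by an O(1) positional splice a[:i] + '-' + a[i+1:m] of the original string.
import Mathlib
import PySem

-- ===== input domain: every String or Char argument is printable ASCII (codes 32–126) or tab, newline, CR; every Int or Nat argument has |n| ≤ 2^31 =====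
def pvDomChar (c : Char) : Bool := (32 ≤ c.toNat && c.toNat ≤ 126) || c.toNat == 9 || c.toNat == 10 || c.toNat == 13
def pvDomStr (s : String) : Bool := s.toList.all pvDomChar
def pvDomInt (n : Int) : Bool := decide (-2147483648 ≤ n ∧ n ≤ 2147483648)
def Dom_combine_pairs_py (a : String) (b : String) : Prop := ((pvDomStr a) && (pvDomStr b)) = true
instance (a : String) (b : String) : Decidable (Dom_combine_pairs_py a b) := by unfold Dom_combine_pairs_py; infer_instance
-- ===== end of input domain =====

-- B replaces A's fused count-and-build loop by one pass collecting differing indices plus an O(1) splice a[:i] + '-' + a[i+1:m]; same return value everywhere.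

-- ===== PORT A =====
-- A's loop over zip(a,b): diff counter, combined accumulator, early return when diff > 1.
def combineGoA : List (Char × Char) → Nat → List Char → Option String
  | [], diff, comb => if diff = 1 then some (String.ofList comb) else none
  | (ca, cb) :: rest, diff, comb =>
    let s := if ca != cb then (diff + 1, comb ++ ['-']) else (diff, comb ++ [ca])
    if s.1 > 1 then none else combineGoA rest s.1 s.2

def combine_pairs_py (a : String) (b : String) : Option String :=
  combineGoA (a.toList.zip b.toList) 0 []

-- ===== PORT B =====
def combine_pairs_py_alt (a : String) (b : String) : Option String :=
  let al := a.toList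
  let bl := b.toList
  let diffs := ((PySem.List.enumerate (al.zip bl) 0).filter (fun p => p.2.1 != p.2.2)).map (·.1)
  match diffs with
  | [i] =>
      let m : Int := (min al.length bl.length : Nat)
      some (String.ofList (PySem.List.slice al none (some i) ++
            '-' :: PySem.List.slice al (some (i + 1)) (some m)))
  | _ => none

-- ===== PRECONDITION & SPEC =====
def Spec_combine_pairs_py (a : String) (b : String) (out : Option String) : Prop := out = combine_pairs_py_alt a b
instance (a : String) (b : String) (out : Option String) : Decidable (Spec_combine_pairs_py a b out) := by unfold Spec_combine_pairs_py; infer_instance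

-- ===== CLAIM (what is proved, stated in full; the proofs are below) =====
def Claim_equal_combine_pairs_py : Prop := ∀ (a : String) (b : String), Dom_combine_pairs_py a b → Spec_combine_pairs_py a b (combine_pairs_py a b)

-- ===== LEMMAS AND PROOFS =====

def pvCount (z : List (Char × Char)) : Nat := (z.filter (fun p => p.1 != p.2)).length

def pvBuild (z : List (Char × Char)) : List Char := z.map (fun p => if p.1 != p.2 then '-' else p.1)

def pvDiffs (z : List (Char × Char)) (s : Int) : List Int :=
  ((PySem.List.enumerate z s).filter (fun p => p.2.1 != p.2.2)).map (·.1)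

lemma pvDiffs_nil (s : Int) : pvDiffs [] s = [] := by
  simp [pvDiffs, PySem.List.enumerate_nil]

lemma pvDiffs_cons (ca cb : Char) (t : List (Char × Char)) (s : Int) :
    pvDiffs ((ca, cb) :: t) s =
      if ca != cb then s :: pvDiffs t (s + 1) else pvDiffs t (s + 1) := by
  simp only [pvDiffs, PySem.List.enumerate_cons, List.filter_cons]
  by_cases h : ca != cb <;> simp [h]

lemma pvCount_cons (ca cb : Char) (t : List (Char × Char)) :
    pvCount ((ca, cb) :: t) = (if ca != cb then 1 else 0) + pvCount t := by
  by_cases h : ca != cb <;> simp [pvCount, h, Nat.add_comm]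

lemma pvBuild_cons (ca cb : Char) (t : List (Char × Char)) :
    pvBuild ((ca, cb) :: t) = (if ca != cb then '-' else ca) :: pvBuild t := rfl

lemma pvDiffs_length (z : List (Char × Char)) (s : Int) :
    (pvDiffs z s).length = pvCount z := by
  induction z generalizing s with
  | nil => simp [pvDiffs_nil, pvCount]
  | cons p t ih =>
    obtain ⟨ca, cb⟩ := p
    rw [pvDiffs_cons, pvCount_cons]
    by_cases h : ca != cb <;> simp [h, ih, Nat.add_comm]

lemma pvDiffs_shift (z : List (Char × Char)) :
    ∀ (s : Int), pvDiffs z (s + 1) = (pvDiffs z s).map (· + 1) := by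
  induction z with
  | nil => intro s; simp [pvDiffs_nil]
  | cons p t ih =>
    intro s
    obtain ⟨ca, cb⟩ := p
    rw [pvDiffs_cons, pvDiffs_cons]
    by_cases h : ca != cb <;> simp [h, ih]

lemma pvBuild_of_count_zero (z : List (Char × Char)) :
    pvCount z = 0 → pvBuild z = z.map (·.1) := by
  induction z with
  | nil => intro _; simp [pvBuild]
  | cons p t ih =>
    intro h0
    obtain ⟨ca, cb⟩ := p
    rw [pvCount_cons] at h0
    by_cases h : ca != cb
    · simp [h] at h0
    · rw [pvBuild_cons, if_neg h]
      simp [ih (by omega : pvCount t = 0)]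

lemma combineGoA_cons (ca cb : Char) (rest : List (Char × Char)) (diff : Nat) (comb : List Char) :
    combineGoA ((ca, cb) :: rest) diff comb =
      if ca != cb then
        (if diff + 1 > 1 then none else combineGoA rest (diff + 1) (comb ++ ['-']))
      else
        (if diff > 1 then none else combineGoA rest diff (comb ++ [ca])) := by
  by_cases h : ca != cb <;> simp [combineGoA, h]

-- A's loop computes: some (accumulator ++ built list) iff total mismatch count is exactly 1.
lemma combineGoA_char (z : List (Char × Char)) :
    ∀ (diff : Nat) (comb : List Char), diff ≤ 1 →
      combineGoA z diff comb =
        if diff + pvCount z = 1 then some (String.ofList (comb ++ pvBuild z)) else none := by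
  induction z with
  | nil =>
    intro diff comb _
    simp [combineGoA, pvCount, pvBuild]
  | cons p t ih =>
    intro diff comb hd
    obtain ⟨ca, cb⟩ := p
    rw [combineGoA_cons, pvCount_cons, pvBuild_cons]
    by_cases h : ca != cb
    · simp only [h, if_true]
      interval_cases diff
      · simp only [Nat.zero_add, show ¬ (0 + 1 > 1) from by omega, if_false]
        rw [ih 1 (comb ++ ['-']) (by omega)]
        by_cases h0 : pvCount t = 0
        · simp [h0]
        · simp [h0]
      · simp
    · rw [if_neg h, if_neg (by omega : ¬ diff > 1)]
      rw [ih diff (comb ++ [ca]) hd]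
      by_cases hone : diff + pvCount t = 1 <;> simp_all

-- When exactly one pair differs, the diffs list is the singleton of a natural index k and
-- the built string is the splice of (map fst z) at k.
lemma pvDiffs_singleton (z : List (Char × Char)) :
    pvCount z = 1 →
      ∃ k : Nat, k < z.length ∧ pvDiffs z 0 = [(k : Int)] ∧
        pvBuild z = (z.map (·.1)).take k ++ '-' :: (z.map (·.1)).drop (k + 1) := by
  induction z with
  | nil => intro h; simp [pvCount] at h
  | cons p t ih =>
    intro h1
    obtain ⟨ca, cb⟩ := p
    rw [pvCount_cons] at h1
    by_cases h : ca != cb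
    · refine ⟨0, by simp, ?_, ?_⟩
      · rw [pvDiffs_cons, if_pos h]
        have hc : pvCount t = 0 := by simp [h] at h1; omega
        have ht : pvDiffs t 1 = [] := by
          have := pvDiffs_length t 1
          exact List.eq_nil_of_length_eq_zero (by rw [this, hc])
        simp [ht]
      · rw [pvBuild_cons, if_pos h]
        have hc : pvCount t = 0 := by simp [h] at h1; omega
        simp [pvBuild_of_count_zero t hc]
    · have hc : pvCount t = 1 := by simp [h] at h1; omega
      obtain ⟨k, hk, hdz, hbz⟩ := ih hc
      refine ⟨k + 1, by simpa using hk, ?_, ?_⟩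
      · rw [pvDiffs_cons, if_neg h, pvDiffs_shift t 0, hdz]
        simp
      · rw [pvBuild_cons, if_neg h]
        simp [hbz]

lemma mapFstZip (al bl : List Char) :
    (al.zip bl).map (·.1) = al.take (min al.length bl.length) := by
  induction al generalizing bl with
  | nil => simp
  | cons x xs ih =>
    cases bl with
    | nil => simp
    | cons y ys => simp [ih ys, Nat.succ_min_succ]

lemma alt_eq (a b : String) :
    combine_pairs_py_alt a b =
      (match pvDiffs (a.toList.zip b.toList) 0 with
       | [i] => some (String.ofList (PySem.List.slice a.toList none (some i) ++
            '-' :: PySem.List.slice a.toList (some (i + 1))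
                (some ((min a.toList.length b.toList.length : Nat) : Int))))
       | _ => none) := rfl

-- ===== VERDICT (by name: the statement is the Claim_ definition above) =====
theorem combine_pairs_py_spec : Claim_equal_combine_pairs_py := by
  intro a b _
  show combine_pairs_py a b = combine_pairs_py_alt a b
  rw [alt_eq]
  unfold combine_pairs_py
  rw [combineGoA_char (a.toList.zip b.toList) 0 [] (by omega)]
  set z := a.toList.zip b.toList with hz
  by_cases hone : pvCount z = 1
  · obtain ⟨k, hk, hdz, hbz⟩ := pvDiffs_singleton z hone
    rw [hdz]
    simp only [Nat.zero_add, hone, if_true, List.nil_append]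
    have hm : z.length = min a.toList.length b.toList.length := by
      rw [hz]; exact List.length_zip
    have hslice1 : PySem.List.slice a.toList none (some (k : Int)) = a.toList.take k :=
      PySem.List.slice_to_natCast a.toList k
    have hslice2 : PySem.List.slice a.toList (some ((k : Int) + 1))
        (some ((min a.toList.length b.toList.length : Nat) : Int)) =
        (a.toList.drop (k + 1)).take (min a.toList.length b.toList.length - (k + 1)) := by
      rw [show (k : Int) + 1 = ((k + 1 : Nat) : Int) from by push_cast; ring]
      exact PySem.List.slice_natCast a.toList (k + 1) (min a.toList.length b.toList.length)
    rw [hslice1, hslice2]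
    rw [hbz, mapFstZip, ← hm, List.take_take, Nat.min_eq_left (by omega), List.drop_take]
  · have hlen := pvDiffs_length z 0
    rcases hdz : pvDiffs z 0 with _ | ⟨i, _ | ⟨j, r⟩⟩
    · simp only [Nat.zero_add, hone, if_false]
    · rw [hdz] at hlen; simp at hlen; omega
    · simp only [Nat.zero_add, hone, if_false]
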